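-- pv_equiv track=rewrite | github.com/robotpy/pynetworktables | _pynetworktables/_impl/support/leb128.py | size_uleb128
-- ===== SOURCE A (Python) =====
-- def size_uleb128(value):
--     count = 0
--     while True:
--         value >>= 7
--         count += 1
--         if value == 0:
--             break
--     return count
-- ===== SOURCE B (Python) =====
-- def size_uleb128(value):
--     return max(1, (value.bit_length() + 6) // 7)
-- ===== Notes on version B (the rewrite author's own statement) =====
-- stated objective: simpler
-- what changed: Replaced the shift-and-count loop with the closed form max(1, (value.bit_length() + 6) // 7); Pre_ excludes negative values, on which A loops forever.
import Mathlib
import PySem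

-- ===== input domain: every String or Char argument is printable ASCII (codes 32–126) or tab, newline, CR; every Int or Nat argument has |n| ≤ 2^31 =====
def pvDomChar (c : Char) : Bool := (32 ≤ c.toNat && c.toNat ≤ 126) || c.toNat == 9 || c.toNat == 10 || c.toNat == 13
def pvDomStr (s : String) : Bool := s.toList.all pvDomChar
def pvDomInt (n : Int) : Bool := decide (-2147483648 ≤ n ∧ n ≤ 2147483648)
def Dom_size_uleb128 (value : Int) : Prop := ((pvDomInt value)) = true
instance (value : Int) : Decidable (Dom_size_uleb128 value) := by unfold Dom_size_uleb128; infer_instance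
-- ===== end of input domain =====

-- B replaces A's shift-and-count loop by the closed form max(1, (bit_length + 6) // 7) (simpler).
-- ===== PORT A =====
-- A's while-loop: shift by 7, count, stop when zero; on nonnegative input '>> 7' is division by 128.
def sizeAuxA (v : Nat) (count : Nat) : Nat :=
  let v' := v >>> 7
  if h : v' = 0 then count + 1 else sizeAuxA v' (count + 1)
termination_by v
decreasing_by
  simp only [Nat.shiftRight_eq_div_pow] at *
  exact Nat.div_lt_self (by omega) (by norm_num)

def size_uleb128 (value : Int) : Int :=
  -- totality guard: on negative input A's loop never terminates (excluded by Pre_)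
  if value < 0 then 0 else (sizeAuxA value.toNat 0 : Int)

-- ===== PORT B =====
-- Python's int.bit_length on a nonnegative integer
def bitLength (v : Nat) : Nat := if v = 0 then 0 else Nat.log2 v + 1

def size_uleb128_alt (value : Int) : Int :=
  Int.ofNat (max 1 ((bitLength value.natAbs + 6) / 7))

-- ===== PRECONDITION & SPEC =====
-- Pre_ excludes negative values: there A's loop never terminates (value >>= 7 converges to -1, never 0).
def Pre_size_uleb128 (value : Int) : Prop := 0 ≤ value
instance (value : Int) : Decidable (Pre_size_uleb128 value) := by unfold Pre_size_uleb128; infer_instance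
def pvWitness_size_uleb128 : Int := (300)

def Spec_size_uleb128 (value : Int) (out : Int) : Prop := out = size_uleb128_alt value
instance (value : Int) (out : Int) : Decidable (Spec_size_uleb128 value out) := by unfold Spec_size_uleb128; infer_instance

-- ===== CLAIM (what is proved, stated in full; the proofs are below) =====
def Claim_equal_size_uleb128 : Prop := ∀ (value : Int), Dom_size_uleb128 value → Pre_size_uleb128 value → Spec_size_uleb128 value (size_uleb128 value)

-- ===== LEMMAS AND PROOFS =====

-- unfolding lemma for A's loop
theorem sizeAuxA_eq (v c : Nat) :
    sizeAuxA v c = if v >>> 7 = 0 then c + 1 else sizeAuxA (v >>> 7) (c + 1) := by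
  rw [sizeAuxA]
  by_cases h : v >>> 7 = 0 <;> simp [h]

theorem shift7_lt (v : Nat) (h : v >>> 7 ≠ 0) : v >>> 7 < v := by
  simp only [Nat.shiftRight_eq_div_pow] at *
  refine Nat.div_lt_self ?_ (by norm_num)
  omega

-- the accumulator only adds
theorem sizeAuxA_acc (v c : Nat) : sizeAuxA v c = c + sizeAuxA v 0 := by
  induction v using Nat.strong_induction_on generalizing c with
  | _ v ih =>
    rw [sizeAuxA_eq v c, sizeAuxA_eq v 0]
    by_cases h : v >>> 7 = 0
    · simp [h]
    · rw [if_neg h, if_neg h, ih _ (shift7_lt v h) (c + 1), ih _ (shift7_lt v h) (0 + 1)]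
      omega

theorem log2_div128 (v : Nat) (h : 128 ≤ v) :
    Nat.log2 (v / 128) = Nat.log2 v - 7 ∧ 7 ≤ Nat.log2 v := by
  constructor
  · have hd : v / 128 = v / 2 / 2 / 2 / 2 / 2 / 2 / 2 := by
      simp [Nat.div_div_eq_div_mul]
    rw [hd]
    simp only [Nat.log2_eq_log_two]
    have s := fun n => Nat.log_div_base 2 n
    rw [s, s, s, s, s, s, s]
    omega
  · rw [(Nat.le_log2 (by omega) : 7 ≤ Nat.log2 v ↔ 2 ^ 7 ≤ v)]
    norm_num; omega

theorem sizeAuxA_closed (v : Nat) : sizeAuxA v 0 = max 1 ((bitLength v + 6) / 7) := by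
  induction v using Nat.strong_induction_on with
  | _ v ih =>
    rw [sizeAuxA_eq]
    have hs : v >>> 7 = v / 128 := by simp [Nat.shiftRight_eq_div_pow]
    by_cases h : v >>> 7 = 0
    · -- v < 128 : one byte
      have hv : v < 128 := by rw [hs] at h; omega
      rw [if_pos h]
      have hbl : bitLength v ≤ 7 := by
        unfold bitLength
        split
        · omega
        · have hlog : Nat.log2 v ≤ 6 := by
            rcases Nat.lt_or_ge (Nat.log2 v) 7 with hl | hl
            · omega
            · exfalso
              have := (Nat.le_log2 (by omega : v ≠ 0)).mp hl
              norm_num at this; omega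
          omega
      omega
    · -- v ≥ 128 : recurse
      have hv : 128 ≤ v := by
        rw [hs] at h
        rcases Nat.lt_or_ge v 128 with hl | hl
        · exact absurd (Nat.div_eq_of_lt hl) h
        · exact hl
      rw [if_neg h, sizeAuxA_acc, ih _ (shift7_lt v h), hs]
      obtain ⟨hlog, hge⟩ := log2_div128 v hv
      have hne : v / 128 ≠ 0 := by rw [← hs]; exact h
      have hvne : v ≠ 0 := by omega
      unfold bitLength
      rw [if_neg hne, if_neg hvne, hlog]
      have hmaxR : max 1 ((Nat.log2 v + 1 + 6) / 7) = (Nat.log2 v + 7) / 7 := by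
        have : 1 ≤ (Nat.log2 v + 7) / 7 := by
          rw [Nat.le_div_iff_mul_le (by norm_num)]; omega
        omega
      have hmaxL : max 1 ((Nat.log2 v - 7 + 1 + 6) / 7) = (Nat.log2 v - 7 + 7) / 7 := by
        have : 1 ≤ (Nat.log2 v - 7 + 7) / 7 := by
          rw [Nat.le_div_iff_mul_le (by norm_num)]; omega
        omega
      rw [hmaxR, hmaxL]
      have hsub : Nat.log2 v - 7 + 7 = Nat.log2 v := by omega
      rw [hsub]
      have h17 : Nat.log2 v + 7 = Nat.log2 v + 1 * 7 := by ring
      rw [h17, Nat.add_mul_div_right _ _ (by norm_num : (0:Nat) < 7)]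
      omega

-- ===== VERDICT (by name: the statement is the Claim_ definition above) =====
theorem size_uleb128_spec : Claim_equal_size_uleb128 := by
  intro value _ hpre
  unfold Pre_size_uleb128 at hpre
  unfold Spec_size_uleb128 size_uleb128 size_uleb128_alt
  rw [if_neg (by omega : ¬ value < 0), sizeAuxA_closed]
  congr 1
  have : value.natAbs = value.toNat := by omega
  rw [this]
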